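-- pv_equiv track=rewrite | github.com/SMSUCU/GameProject | ulamfunc.py | ulam_generator
-- ===== SOURCE A (Python) =====
-- def ulam_generator(chyslo):
--     ''' (int) -> list
--     This function returns a list of ulam numbers in sequence (chyslo)
--     >>> ulam_generator(30)
--     [1, 2, 3, 4, 6, 8, 11, 13, 16, 18, 26, 28, 36, 38, 47, 48, 53, 57, 62, 69, 72, 77, 82, 87, 97, 99, 102, 106, 114, 126, 131, 138]
--     >>> ulam_generator(15)
--     [1, 2, 3, 4, 6, 8, 11, 13, 16, 18, 26, 28, 36, 38, 47, 48, 53]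
--     '''
--     ulam = [1, 2]
--     for i in range(chyslo):
--         lst = []
--         for each in ulam:
--             for every in ulam:
--                 if each != every:
--                     lst.append(each + every)
--         while True:
--             a = min(lst)
--             if lst.count(a) == 2 and ulam.count(a) < 1:
--                 ulam.append(a)
--                 break
--             else:
--                 for i in range(lst.count(a)):
--                     lst.remove(a)
--     return ulam
-- ===== SOURCE B (Python) =====
-- def ulam_generator(chyslo):
--     ''' (int) -> list
--     Incremental sieve: keep a counter of ordered pair-sum representation
--     counts, extended by 2 for each new sum when an Ulam number is appended,
--     instead of rebuilding and destructively scanning the sum list each round.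
--     '''
--     ulam = [1, 2]
--     members = {1, 2}
--     cnt = {3: 2}
--     for _ in range(chyslo):
--         a = min(s for s, c in cnt.items() if c == 2 and s not in members)
--         for u in ulam:
--             cnt[u + a] = cnt.get(u + a, 0) + 2
--         ulam.append(a)
--         members.add(a)
--     return ulam
-- ===== Notes on version B (the rewrite author's own statement) =====
-- stated objective: faster
-- what changed: Instead of rebuilding the full pair-sum list and destructively scanning/removing minima every round, B maintains a dictionary of pair-sum representation counts and a membership set incrementally, adding the sums contributed by each new Ulam number once and picking the next Ulam number as the smallest counter key whose count shows a unique pair and that is not yet in the sequence.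
import Mathlib
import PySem

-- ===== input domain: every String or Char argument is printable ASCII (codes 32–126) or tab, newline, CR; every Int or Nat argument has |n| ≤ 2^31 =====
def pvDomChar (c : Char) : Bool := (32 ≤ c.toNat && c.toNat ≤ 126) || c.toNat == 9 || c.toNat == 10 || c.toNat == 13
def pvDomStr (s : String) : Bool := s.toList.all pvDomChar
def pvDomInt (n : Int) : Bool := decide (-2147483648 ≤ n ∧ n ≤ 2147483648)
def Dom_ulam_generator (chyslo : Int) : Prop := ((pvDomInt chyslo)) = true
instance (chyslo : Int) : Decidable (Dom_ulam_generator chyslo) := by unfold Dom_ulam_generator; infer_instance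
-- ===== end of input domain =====

-- B replaces A's per-round rebuild of the pair-sum list and destructive min-scan by an
-- incrementally maintained counter of pair-sum representation counts (objective: faster).

-- ===== PORT A =====
-- lst = [] ; for each in ulam: for every in ulam: if each != every: lst.append(each + every)
def pvLstA (ulam : List Int) : List Int :=
  ulam.foldl (fun lst each =>
    ulam.foldl (fun lst every =>
      if each ≠ every then lst ++ [each + every] else lst) lst) []

-- for i in range(lst.count(a)): lst.remove(a)   (remove? never fails here: a is removed exactly count times)
def pvRemoveAll (lst : List Int) (a : Int) : List Int :=
  (PySem.List.pyRange 0 (lst.count a : Int) 1).foldl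
    (fun l _ => (PySem.List.remove? l a).getD l) lst

-- the 'while True' loop; fuel bounds the rounds (each round removes ≥ 1 element).
-- On an empty lst Python's min([]) raises ValueError; that branch is proved unreachable.
def pvWhileA (ulam : List Int) : Nat → List Int → List Int
  | 0, _ => ulam
  | fuel+1, lst =>
    match PySem.List.min? lst (fun x => x) with
    | none => ulam
    | some a =>
      if lst.count a = 2 ∧ ulam.count a < 1 then ulam ++ [a]
      else pvWhileA ulam fuel (pvRemoveAll lst a)

def pvStepA (ulam : List Int) : List Int :=
  let lst := pvLstA ulam
  pvWhileA ulam (lst.length + 1) lst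

def ulam_generator (chyslo : Int) : List Int :=
  (PySem.List.pyRange 0 chyslo 1).foldl (fun ulam _ => pvStepA ulam) [1, 2]

-- ===== PORT B =====
-- [s for s, c in cnt.items() if c == 2 and s not in members]
def pvCandsB (cnt : PySem.Dict Int Int) (members : PySem.Set Int) : List Int :=
  (cnt.items.filter (fun sc => sc.2 == 2 && !(PySem.Set.contains members sc.1))).map Prod.fst

-- one pass of B's for-loop body; min() of an empty candidate list would raise (proved unreachable)
def pvStepB (st : List Int × PySem.Set Int × PySem.Dict Int Int) :
    List Int × PySem.Set Int × PySem.Dict Int Int :=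
  let (ulam, members, cnt) := st
  match PySem.List.min? (pvCandsB cnt members) (fun x => x) with
  | none => st
  | some a =>
    let cnt := ulam.foldl (fun d u => d.insert (u + a) (d.getD (u + a) 0 + 2)) cnt
    (ulam ++ [a], PySem.Set.add members a, cnt)

def ulam_generator_alt (chyslo : Int) : List Int :=
  ((PySem.List.pyRange 0 chyslo 1).foldl (fun st _ => pvStepB st)
    ([1, 2], PySem.Set.ofList [1, 2], PySem.Dict.ofList [(3, 2)])).1

-- ===== PRECONDITION & SPEC =====
def Spec_ulam_generator (chyslo : Int) (out : List Int) : Prop := out = ulam_generator_alt chyslo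
instance (chyslo : Int) (out : List Int) : Decidable (Spec_ulam_generator chyslo out) := by unfold Spec_ulam_generator; infer_instance

-- ===== CLAIM (what is proved, stated in full; the proofs are below) =====
def Claim_equal_ulam_generator : Prop := ∀ (chyslo : Int), Dom_ulam_generator chyslo → Spec_ulam_generator chyslo (ulam_generator chyslo)

-- ===== LEMMAS AND PROOFS =====

def pvCnt (ulam : List Int) (s : Int) : Nat :=
  (ulam.map (fun e => ulam.countP (fun v => decide (e ≠ v) && decide (e + v = s)))).sum

def pvQ (ulam lst : List Int) (x : Int) : Prop := lst.count x = 2 ∧ x ∉ ulam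

def pvInv (ulam : List Int) (members : PySem.Set Int) (cnt : PySem.Dict Int Int) : Prop :=
  ulam.Pairwise (· < ·) ∧ 2 ≤ ulam.length ∧ (∀ x ∈ ulam, 1 ≤ x) ∧
  (∀ x : Int, x ∈ members ↔ x ∈ ulam) ∧
  (∀ s : Int, cnt.getD s 0 = ((pvLstA ulam).count s : Int)) ∧
  cnt.keys.Nodup ∧
  (∀ s : Int, (pvLstA ulam).count s = 2 → s ∉ ulam → ∀ x ∈ ulam, x < s)

theorem pvLstA_eq (ulam : List Int) :
    pvLstA ulam = ulam.flatMap (fun e => (ulam.filter (fun v => decide (e ≠ v))).map (fun v => e + v)) := by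
  unfold pvLstA
  have h : ∀ (init : List Int) (each : Int),
      ulam.foldl (fun lst every => if each ≠ every then lst ++ [each + every] else lst) init
        = init ++ (ulam.filter (fun v => decide (each ≠ v))).map (fun v => each + v) := by
    intro init each
    exact PySem.List.foldl_append_ite (fun v => each ≠ v) (fun v => each + v) ulam init
  calc ulam.foldl (fun lst each =>
        ulam.foldl (fun lst every => if each ≠ every then lst ++ [each + every] else lst) lst) []
      = ulam.foldl (fun lst each => lst ++ (ulam.filter (fun v => decide (each ≠ v))).map (fun v => each + v)) [] := by
        apply PySem.List.foldl_congr_mem; intro acc x _; exact h acc x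
    _ = _ := by
        simpa using PySem.List.foldl_append_eq_flatMap (fun each => (ulam.filter (fun v => decide (each ≠ v))).map (fun v => each + v)) ulam []

theorem count_flatMap_sum {α β : Type} [DecidableEq β] (l : List α) (g : α → List β) (s : β) :
    (l.flatMap g).count s = (l.map (fun e => (g e).count s)).sum := by
  induction l with
  | nil => simp
  | cons x t ih => simp [List.flatMap_cons, List.count_append, ih]

theorem count_pvLstA (ulam : List Int) (s : Int) : (pvLstA ulam).count s = pvCnt ulam s := by
  rw [pvLstA_eq, count_flatMap_sum]
  unfold pvCnt
  congr 1
  apply List.map_congr_left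
  intro e _
  rw [List.count_eq_countP, List.countP_map, List.countP_filter]
  apply List.countP_congr
  intro v _
  simp [Function.comp, Bool.and_comm]


theorem foldl_const_iterate {α β : Type} (l : List β) (g : α → α) (init : α) :
    l.foldl (fun acc _ => g acc) init = g^[l.length] init := by
  induction l generalizing init with
  | nil => simp
  | cons x t ih => simp [ih, Function.iterate_succ_apply]

theorem filter_ne_erase (l : List Int) (a : Int) :
    (l.erase a).filter (fun x => decide (x ≠ a)) = l.filter (fun x => decide (x ≠ a)) := by
  induction l with
  | nil => simp
  | cons x t ih =>
    by_cases hx : x = a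
    · subst hx; simp [List.erase_cons_head]
    · rw [List.erase_cons_tail]
      · simp only [List.filter_cons, ih]
      · simp [hx]

theorem iterate_remove (a : Int) : ∀ (n : Nat) (lst : List Int), lst.count a = n →
    (fun l => (PySem.List.remove? l a).getD l)^[n] lst = lst.filter (fun x => decide (x ≠ a)) := by
  intro n
  induction n with
  | zero =>
    intro lst h
    have hnot : a ∉ lst := by simpa using List.count_eq_zero.mp h
    simp only [Function.iterate_zero_apply]
    rw [eq_comm, List.filter_eq_self]
    intro x hx
    simp
    rintro rfl
    exact hnot hx
  | succ k ih =>
    intro lst h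
    have hmem : a ∈ lst := List.count_pos_iff.mp (by omega)
    rw [Function.iterate_succ_apply]
    simp only [PySem.List.remove?_eq_some_erase lst a hmem, Option.getD_some]
    rw [ih (lst.erase a) (by rw [List.count_erase_self]; omega)]
    exact filter_ne_erase lst a

theorem pvRemoveAll_eq (lst : List Int) (a : Int) :
    pvRemoveAll lst a = lst.filter (fun x => decide (x ≠ a)) := by
  unfold pvRemoveAll
  rw [foldl_const_iterate]
  rw [PySem.List.length_pyRange_one]
  have : ((lst.count a : Int) - 0).toNat = lst.count a := by omega
  rw [this]
  exact iterate_remove a (lst.count a) lst rfl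



theorem count_filter_ne (lst : List Int) (a x : Int) (hx : x ≠ a) :
    (lst.filter (fun y => decide (y ≠ a))).count x = lst.count x := by
  rw [List.count_filter]
  simp [hx]


theorem while_char (fuel : Nat) : ∀ (ulam lst : List Int) (m : Int),
    lst.length < fuel → m ∈ lst → pvQ ulam lst m →
    (∀ y ∈ lst, pvQ ulam lst y → m ≤ y) →
    pvWhileA ulam fuel lst = ulam ++ [m] := by
  induction fuel with
  | zero => intro ulam lst m hf _ _ _; omega
  | succ f ih =>
    intro ulam lst m hf hm hQ hmin
    have hne : lst ≠ [] := List.ne_nil_of_mem hm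
    obtain ⟨a, ha⟩ : ∃ a, PySem.List.min? lst (fun x => x) = some a := by
      cases h : PySem.List.min? lst (fun x => x) with
      | none => exact absurd ((PySem.List.min?_eq_none_iff _ _).mp h) hne
      | some a => exact ⟨a, rfl⟩
    have hamem : a ∈ lst := PySem.List.min?_mem ha
    have hale : ∀ y ∈ lst, a ≤ y := fun y hy => PySem.List.min?_id_le ha y hy
    rw [pvWhileA, ha]
    show (if List.count a lst = 2 ∧ List.count a ulam < 1 then ulam ++ [a]
          else pvWhileA ulam f (pvRemoveAll lst a)) = ulam ++ [m]
    by_cases hcond : lst.count a = 2 ∧ ulam.count a < 1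
    · rw [if_pos hcond]
      have hQa : pvQ ulam lst a := ⟨hcond.1, List.count_eq_zero.mp (by omega)⟩
      have h1 : m ≤ a := hmin a hamem hQa
      have h2 : a ≤ m := hale m hm
      rw [le_antisymm h1 h2]
    · rw [if_neg hcond]
      have hma : m ≠ a := by
        rintro rfl
        exact hcond ⟨hQ.1, by rw [List.count_eq_zero.mpr hQ.2]; omega⟩
      rw [pvRemoveAll_eq]
      apply ih
      · calc (lst.filter (fun x => decide (x ≠ a))).length < lst.length := by
              apply List.length_filter_lt_length_iff_exists.mpr
              exact ⟨a, hamem, by simp⟩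
          _ ≤ f := by omega
      · exact List.mem_filter.mpr ⟨hm, by simp [hma]⟩
      · exact ⟨by rw [count_filter_ne lst a m hma]; exact hQ.1, hQ.2⟩
      · intro y hy hQy
        have hya : y ≠ a := by simpa using (List.mem_filter.mp hy).2
        have hylst : y ∈ lst := (List.mem_filter.mp hy).1
        apply hmin y hylst
        exact ⟨by rw [← count_filter_ne lst a y hya]; exact hQy.1, hQy.2⟩

theorem exists_candidate (ulam : List Int) (hp : ulam.Pairwise (· < ·))
    (hl : 2 ≤ ulam.length) (hpos : ∀ x ∈ ulam, 1 ≤ x) :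
    ∃ S, pvQ ulam (pvLstA ulam) S := by
  obtain ⟨ys, v, u, rfl⟩ : ∃ ys v u, ulam = ys ++ [v, u] := by
    match hrv : ulam.reverse with
    | [] => simp at hrv; subst hrv; simp at hl
    | [x] => rw [← List.reverse_reverse ulam, hrv] at hl ⊢; simp at hl
    | u :: v :: t =>
      refine ⟨t.reverse, v, u, ?_⟩
      rw [← List.reverse_reverse ulam, hrv]
      simp
  have hpa := List.pairwise_append.mp hp
  have hvu : v < u := by
    have := hpa.2.1
    simp at this
    exact this
  have hysv : ∀ y ∈ ys, y < v := fun y hy => hpa.2.2 y hy v (by simp)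
  have hle : ∀ w ∈ ys ++ [v, u], w ≤ u := by
    intro w hw
    rcases List.mem_append.mp hw with h | h
    · have := hysv w h; omega
    · simp at h; rcases h with rfl | rfl <;> omega
  have hv1 : (1 : Int) ≤ v := hpos v (by simp)
  have hnd : (ys ++ [v, u]).Nodup := hp.imp (fun h => ne_of_lt h)
  refine ⟨v + u, ?_, ?_⟩
  · rw [count_pvLstA]
    unfold pvCnt
    rw [List.map_append, List.sum_append]
    have part1 : ((ys.map (fun e => (ys ++ [v, u]).countP
        (fun w => decide (e ≠ w) && decide (e + w = v + u)))).sum) = 0 := by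
      apply List.sum_eq_zero
      intro x hx
      obtain ⟨e, he, rfl⟩ := List.mem_map.mp hx
      apply List.countP_eq_zero.mpr
      intro w hw
      have h1 : e < v := hysv e he
      have h2 : w ≤ u := hle w hw
      simp only [Bool.and_eq_true, decide_eq_true_eq]
      rintro ⟨-, h3⟩
      omega
    have partv : (ys ++ [v, u]).countP
        (fun w => decide (v ≠ w) && decide (v + w = v + u)) = 1 := by
      have hcg : (ys ++ [v, u]).countP (fun w => decide (v ≠ w) && decide (v + w = v + u))
          = (ys ++ [v, u]).countP (fun w => w == u) := by
        apply List.countP_congr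
        intro w _
        by_cases hwu : w = u
        · subst hwu; simp [hvu.ne]; try omega
        · simp [hwu]; try omega
      rw [hcg, ← List.count_eq_countP]
      exact List.count_eq_one_of_mem hnd (by simp)
    have partu : (ys ++ [v, u]).countP
        (fun w => decide (u ≠ w) && decide (u + w = v + u)) = 1 := by
      have hcg : (ys ++ [v, u]).countP (fun w => decide (u ≠ w) && decide (u + w = v + u))
          = (ys ++ [v, u]).countP (fun w => w == v) := by
        apply List.countP_congr
        intro w _
        by_cases hwv : w = v
        · subst hwv; simp [hvu.ne']; try omega
        · simp [hwv]; try omega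
      rw [hcg, ← List.count_eq_countP]
      exact List.count_eq_one_of_mem hnd (by simp)
    rw [part1]
    simp only [List.map_cons, List.map_nil, List.sum_cons, List.sum_nil]
    rw [partv, partu]
    omega
  · intro hmem
    have := hle (v + u) hmem
    omega

theorem sum_map_add_nat {α : Type} (l : List α) (f g : α → Nat) :
    (l.map (fun x => f x + g x)).sum = (l.map f).sum + (l.map g).sum := by
  induction l with
  | nil => simp
  | cons x t ih => simp [ih]; omega

theorem pvCnt_append (ulam : List Int) (a s : Int) (ha : a ∉ ulam) :
    pvCnt (ulam ++ [a]) s = pvCnt ulam s + 2 * ulam.count (s - a) := by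
  unfold pvCnt
  rw [List.map_append, List.sum_append]
  have hmap : ulam.map (fun e => (ulam ++ [a]).countP (fun v => decide (e ≠ v) && decide (e + v = s)))
      = ulam.map (fun e => ulam.countP (fun v => decide (e ≠ v) && decide (e + v = s))
          + (if e + a = s then 1 else 0)) := by
    apply List.map_congr_left
    intro e he
    rw [List.countP_append]
    congr 1
    have hea : e ≠ a := fun h => ha (h ▸ he)
    by_cases h : e + a = s <;> simp [h, hea]
  have hsingle : ([a].map (fun e => (ulam ++ [a]).countP (fun v => decide (e ≠ v) && decide (e + v = s)))).sum
      = ulam.count (s - a) := by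
    simp only [List.map_cons, List.map_nil, List.sum_cons, List.sum_nil]
    rw [List.countP_append]
    have h1 : [a].countP (fun v => decide (a ≠ v) && decide (a + v = s)) = 0 := by simp
    have h2 : ulam.countP (fun v => decide (a ≠ v) && decide (a + v = s))
        = ulam.countP (fun v => v == s - a) := by
      apply List.countP_congr
      intro w hw
      have haw : a ≠ w := fun h => ha (h ▸ hw)
      by_cases h : w = s - a
      · subst h; simp [haw]; try omega
      · simp [h, haw]; try omega
    rw [h1, h2, ← List.count_eq_countP]
    omega
  rw [hmap, hsingle, sum_map_add_nat]
  have hind : ∀ l : List Int, (l.map (fun e => if e + a = s then 1 else 0)).sum = l.count (s - a) := by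
    intro l
    induction l with
    | nil => simp
    | cons x t ih =>
      rw [List.map_cons, List.sum_cons, ih, List.count_cons]
      by_cases h : x + a = s
      · have : x = s - a := by omega
        simp [this]
        omega
      · have : ¬ (x = s - a) := by omega
        simp [h, this]
  rw [hind]
  omega

theorem getD_foldl_insert_add_two (l : List Int) (c : PySem.Dict Int Int) (a s : Int) :
    (l.foldl (fun d u => d.insert (u + a) (d.getD (u + a) 0 + 2)) c).getD s 0
      = c.getD s 0 + 2 * (l.count (s - a) : Int) := by
  induction l generalizing c with
  | nil => simp
  | cons x t ih =>
    rw [List.foldl_cons, ih, PySem.Dict.getD_insert, List.count_cons]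
    by_cases h : s = x + a
    · rw [if_pos h]
      have hx : (x == s - a) = true := by simp; omega
      rw [hx, if_pos rfl]
      subst h
      push_cast
      ring
    · rw [if_neg h]
      have hx : (x == s - a) = false := by simp; omega
      rw [hx]
      simp

theorem nodup_keys_foldl_insert (l : List Int) (c : PySem.Dict Int Int) (a : Int)
    (h : c.keys.Nodup) :
    ((l.foldl (fun d u => d.insert (u + a) (d.getD (u + a) 0 + 2)) c).keys).Nodup := by
  induction l generalizing c with
  | nil => exact h
  | cons x t ih =>
    rw [List.foldl_cons]
    exact ih _ (PySem.Dict.nodup_keys_insert _ _ _ h)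


theorem mem_pvCandsB (cnt : PySem.Dict Int Int) (members : PySem.Set Int)
    (hn : cnt.keys.Nodup) (x : Int) :
    x ∈ pvCandsB cnt members ↔ cnt.getD x 0 = 2 ∧ x ∉ members := by
  unfold pvCandsB
  rw [List.mem_map]
  constructor
  · rintro ⟨⟨k, v⟩, hmem, rfl⟩
    obtain ⟨hitems, hcond⟩ := List.mem_filter.mp hmem
    simp only [Bool.and_eq_true, beq_iff_eq, Bool.not_eq_true'] at hcond
    have hget : cnt.get? k = some v := PySem.Dict.get?_of_mem_items _ hitems hn
    refine ⟨?_, ?_⟩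
    · rw [PySem.Dict.getD_eq_get?_getD, hget, hcond.1]; rfl
    · intro hm
      have := (PySem.Set.contains_iff members k).mpr hm
      rw [hcond.2] at this
      exact Bool.false_ne_true this
  · rintro ⟨hg, hm⟩
    have hget : cnt.get? x = some 2 := by
      rw [PySem.Dict.getD_eq_get?_getD] at hg
      cases hge : cnt.get? x with
      | none => rw [hge] at hg; simp at hg
      | some v => rw [hge] at hg; simp at hg; rw [hg]
    refine ⟨(x, 2), List.mem_filter.mpr ⟨PySem.Dict.mem_items_of_get?_eq_some _ hget, ?_⟩, rfl⟩
    simp only [Bool.and_eq_true, beq_iff_eq, Bool.not_eq_true']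
    refine ⟨trivial, ?_⟩
    cases hc : PySem.Set.contains members x
    · rfl
    · exact absurd ((PySem.Set.contains_iff members x).mp hc) hm




theorem step_eq (ulam : List Int) (members : PySem.Set Int) (cnt : PySem.Dict Int Int)
    (hI : pvInv ulam members cnt) :
    (pvStepB (ulam, members, cnt)).1 = pvStepA ulam ∧
    pvInv (pvStepB (ulam, members, cnt)).1 (pvStepB (ulam, members, cnt)).2.1
          (pvStepB (ulam, members, cnt)).2.2 := by
  obtain ⟨hp, hl2, hpos, hmem, hcnt, hnd, hcand⟩ := hI
  have hmemC : ∀ x : Int, x ∈ pvCandsB cnt members ↔ pvQ ulam (pvLstA ulam) x := by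
    intro x
    rw [mem_pvCandsB cnt members hnd x]
    unfold pvQ
    rw [hcnt x, hmem x]
    constructor
    · rintro ⟨h1, h2⟩; exact ⟨by omega, h2⟩
    · rintro ⟨h1, h2⟩; exact ⟨by omega, h2⟩
  obtain ⟨S, hS⟩ := exists_candidate ulam hp hl2 hpos
  have hSc : S ∈ pvCandsB cnt members := (hmemC S).mpr hS
  obtain ⟨a, ha⟩ : ∃ a, PySem.List.min? (pvCandsB cnt members) (fun x => x) = some a := by
    cases h : PySem.List.min? (pvCandsB cnt members) (fun x => x) with
    | none =>
      rw [(PySem.List.min?_eq_none_iff _ _).mp h] at hSc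
      exact absurd hSc List.not_mem_nil
    | some a => exact ⟨a, rfl⟩
  have hQa : pvQ ulam (pvLstA ulam) a := (hmemC a).mp (PySem.List.min?_mem ha)
  have hminQ : ∀ y : Int, pvQ ulam (pvLstA ulam) y → a ≤ y := by
    intro y hy
    exact PySem.List.min?_id_le ha y ((hmemC y).mpr hy)
  have hstep : pvStepB (ulam, members, cnt)
      = (ulam ++ [a], PySem.Set.add members a,
         ulam.foldl (fun d u => d.insert (u + a) (d.getD (u + a) 0 + 2)) cnt) := by
    simp only [pvStepB, ha]
  have hA : pvStepA ulam = ulam ++ [a] := by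
    unfold pvStepA
    apply while_char
    · omega
    · exact List.count_pos_iff.mp (by have h := hQa.1; omega)
    · exact hQa
    · intro y _ hy; exact hminQ y hy
  have hbig : ∀ x ∈ ulam, x < a := hcand a hQa.1 hQa.2
  have hanotm : a ∉ ulam := hQa.2
  have ha1 : (1 : Int) ≤ a := by
    obtain ⟨x0, hx0⟩ : ∃ x0, x0 ∈ ulam := by
      cases ulam with
      | nil => simp at hl2
      | cons x t => exact ⟨x, by simp⟩
    have := hpos x0 hx0
    have := hbig x0 hx0
    omega
  rw [hstep]
  refine ⟨hA.symm, ?_, ?_, ?_, ?_, ?_, ?_, ?_⟩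
  · -- pairwise
    apply List.pairwise_append.mpr
    exact ⟨hp, List.pairwise_singleton _ _, by
      intro x hx y hy
      simp at hy
      subst hy
      exact hbig x hx⟩
  · simp; omega
  · intro x hx
    rcases List.mem_append.mp hx with h | h
    · exact hpos x h
    · simp at h; omega
  · intro x
    rw [PySem.Set.mem_add]
    rw [hmem x]
    simp
  · -- counter invariant
    intro s
    rw [getD_foldl_insert_add_two, hcnt s]
    have h1 : (pvLstA ulam).count s = pvCnt ulam s := count_pvLstA ulam s
    have h2 : (pvLstA (ulam ++ [a])).count s = pvCnt (ulam ++ [a]) s := count_pvLstA _ s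
    rw [h1, h2, pvCnt_append ulam a s hanotm]
    push_cast
    ring
  · exact nodup_keys_foldl_insert ulam cnt a hnd
  · -- candidate bound invariant
    intro s hs2 hsnot x hx
    have hsa : s ≠ a := by
      intro h; subst h; exact hsnot (List.mem_append.mpr (Or.inr (by simp)))
    have hsnotu : s ∉ ulam := fun h => hsnot (List.mem_append.mpr (Or.inl h))
    have hcnt' : pvCnt ulam s + 2 * ulam.count (s - a) = 2 := by
      rw [← pvCnt_append ulam a s hanotm, ← count_pvLstA]
      exact hs2
    have hlt : a < s := by
      by_cases hc : ulam.count (s - a) = 0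
      · have hpv : pvCnt ulam s = 2 := by omega
        have hq : pvQ ulam (pvLstA ulam) s := ⟨by rw [count_pvLstA]; exact hpv, hsnotu⟩
        have := hminQ s hq
        omega
      · have hmem' : s - a ∈ ulam := List.count_pos_iff.mp (by omega)
        have := hpos (s - a) hmem'
        omega
    rcases List.mem_append.mp hx with h | h
    · have := hbig x h; omega
    · simp at h; omega

theorem fold_eq (l : List Int) : ∀ (ulam : List Int) (members : PySem.Set Int)
    (cnt : PySem.Dict Int Int), pvInv ulam members cnt →
    (l.foldl (fun st _ => pvStepB st) (ulam, members, cnt)).1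
      = l.foldl (fun u _ => pvStepA u) ulam := by
  induction l with
  | nil => intro ulam members cnt _; rfl
  | cons x t ih =>
    intro ulam members cnt hI
    obtain ⟨h1, h2⟩ := step_eq ulam members cnt hI
    rw [List.foldl_cons, List.foldl_cons]
    have heta : pvStepB (ulam, members, cnt)
        = ((pvStepB (ulam, members, cnt)).1, (pvStepB (ulam, members, cnt)).2.1,
           (pvStepB (ulam, members, cnt)).2.2) := rfl
    rw [heta, ih _ _ _ h2, h1]

theorem pvLstA_init : pvLstA [1, 2] = [3, 3] := by decide

theorem inv_init : pvInv [1, 2] (PySem.Set.ofList [1, 2]) (PySem.Dict.ofList [(3, 2)]) := by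
  refine ⟨?_, ?_, ?_, ?_, ?_, ?_, ?_⟩
  · decide
  · decide
  · decide
  · intro x
    show x ∈ PySem.Set.ofList [1, 2] ↔ _
    rw [PySem.Set.mem_ofList]
  · intro s
    rw [pvLstA_init]
    by_cases h : s = 3
    · subst h; decide
    · rw [PySem.Dict.getD_eq_get?_getD]
      have hg : (PySem.Dict.ofList [((3 : Int), (2 : Int))]).get? s = none := by
        rw [show PySem.Dict.ofList [((3 : Int), (2 : Int))] = PySem.Dict.mk [(3, 2)] from by decide]
        rw [PySem.Dict.get?_mk_cons]
        have h3 : ((3 : Int) == s) = false := by simp [Ne.symm h]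
        rw [h3]
        rfl
      rw [hg]
      simp [Ne.symm h]
  · decide
  · intro s hs2 hsnot x hx
    rw [pvLstA_init] at hs2
    have : s ∈ [(3 : Int), 3] := List.count_pos_iff.mp (by omega)
    simp at this
    subst this
    simp at hx
    rcases hx with rfl | rfl <;> omega


-- ===== VERDICT (by name: the statement is the Claim_ definition above) =====
theorem ulam_generator_spec : Claim_equal_ulam_generator := by
  intro chyslo _
  unfold Spec_ulam_generator ulam_generator ulam_generator_alt
  exact (fold_eq _ _ _ _ inv_init).symm
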